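-- pv_equiv track=rewrite | github.com/rajatbhardwaj1/Assignments | semester-5/COL215P_Digital_Logic/A4_Boolean Function Expansion/2020CS50436_2020CS50649_assignment_2.py | convert_string_to_list
-- ===== SOURCE A (Python) =====
-- import string
--
-- def convert_string_to_list(s : string):
--     ans = []
--     skip = False
--
--     for i in range(len(s)):
--         if not skip:
--             if i < len(s) - 1:
--                 if s[i+1] == "'":
--                     skip = True
--                     ans.append(s[i] + s[i+1])
--
--                 else :
--                     ans.append(s[i])
--             else :
--                 ans.append(s[i])
--         else :
--             skip = False
--     return ans
-- ===== SOURCE B (Python) =====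
-- import re
--
-- def convert_string_to_list(s):
--     # regex tokenization: each character optionally followed by one apostrophe
--     return re.findall(r"(?s).'?", s)
-- ===== Notes on version B (the rewrite author's own statement) =====
-- stated objective: idiomatic
-- what changed: Replaces the manual index loop with skip flag and lookahead by a single regex findall (DOTALL) whose pattern matches any one character optionally followed by one apostrophe.
import Mathlib
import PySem

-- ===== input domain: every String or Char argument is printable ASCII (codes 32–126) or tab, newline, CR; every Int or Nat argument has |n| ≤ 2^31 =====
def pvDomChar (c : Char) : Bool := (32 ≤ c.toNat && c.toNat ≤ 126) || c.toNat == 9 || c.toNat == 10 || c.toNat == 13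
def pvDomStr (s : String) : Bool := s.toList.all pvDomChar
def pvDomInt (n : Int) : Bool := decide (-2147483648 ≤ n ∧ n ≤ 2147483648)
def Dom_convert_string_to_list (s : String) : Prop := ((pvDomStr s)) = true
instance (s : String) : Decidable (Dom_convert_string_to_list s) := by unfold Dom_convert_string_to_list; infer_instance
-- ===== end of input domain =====

-- B replaces A's index loop with skip flag by a regex tokenization (".'?", DOTALL): same values, idiomatic.

-- ===== PORT A =====
-- A's `for i in range(len(s))` loop with its `ans`/`skip` state, as the obvious
-- recursion on the index i over the fixed character list.
def convertLoopA (cs : List Char) (i : Nat) (ans : List String) (skip : Bool) : List String :=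
  if i < cs.length then
    if !skip then
      if i < cs.length - 1 then
        if cs.getD (i+1) ' ' = '\'' then
          convertLoopA cs (i+1) (ans ++ [String.mk [cs.getD i ' ', cs.getD (i+1) ' ']]) true
        else
          convertLoopA cs (i+1) (ans ++ [String.mk [cs.getD i ' ']]) skip
      else
        convertLoopA cs (i+1) (ans ++ [String.mk [cs.getD i ' ']]) skip
    else
      convertLoopA cs (i+1) ans false
  else ans
termination_by cs.length - i

def convert_string_to_list (s : String) : List String :=
  convertLoopA s.toList 0 [] false

-- ===== PORT B =====
-- hand port of re.findall(r"(?s).'?", s): at each position the regex matches one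
-- character plus, greedily, one following apostrophe; matching resumes after the match.
def reFindallDotApos : List Char → List String
  | [] => []
  | [c] => [String.mk [c]]
  | c :: d :: rest =>
      if d = '\'' then String.mk [c, d] :: reFindallDotApos rest
      else String.mk [c] :: reFindallDotApos (d :: rest)

def convert_string_to_list_alt (s : String) : List String :=
  reFindallDotApos s.toList

-- ===== PRECONDITION & SPEC =====
def Spec_convert_string_to_list (s : String) (out : List String) : Prop := out = convert_string_to_list_alt s
instance (s : String) (out : List String) : Decidable (Spec_convert_string_to_list s out) := by unfold Spec_convert_string_to_list; infer_instance

-- ===== CLAIM (what is proved, stated in full; the proofs are below) =====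
def Claim_equal_convert_string_to_list : Prop := ∀ (s : String), Dom_convert_string_to_list s → Spec_convert_string_to_list s (convert_string_to_list s)

-- ===== LEMMAS AND PROOFS =====

lemma convertLoopA_eq (k : Nat) :
    ∀ (cs : List Char) (i : Nat) (ans : List String), cs.length - i ≤ k →
      convertLoopA cs i ans false = ans ++ reFindallDotApos (cs.drop i) := by
  induction k with
  | zero =>
      intro cs i ans hk
      have h : ¬ i < cs.length := by omega
      have hnil : List.drop i cs = [] := List.drop_eq_nil_of_le (by omega)
      rw [convertLoopA]
      simp [h, hnil, reFindallDotApos]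
  | succ k ih =>
      intro cs i ans hk
      by_cases h : i < cs.length
      · rw [convertLoopA]
        simp only [h, if_true, Bool.not_false, if_pos]
        by_cases h2 : i + 1 < cs.length
        · have hlt : i < cs.length - 1 := by omega
          have hdrop : cs.drop i = cs[i] :: cs.drop (i+1) := List.drop_eq_getElem_cons h
          have hdrop2 : cs.drop (i+1) = cs[i+1] :: cs.drop (i+2) := List.drop_eq_getElem_cons h2
          have hg1 : cs.getD i ' ' = cs[i] := List.getD_eq_getElem cs ' ' h
          have hg2 : cs.getD (i+1) ' ' = cs[i+1] := List.getD_eq_getElem cs ' ' h2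
          simp only [hlt, if_true, hg1, hg2]
          by_cases hq : cs[i+1] = '\''
          · simp only [hq, if_true]
            -- one more unfolding: the skip=true step at index i+1
            rw [convertLoopA]
            simp only [h2, if_true, Bool.not_true, Bool.false_eq_true, if_false]
            rw [ih cs (i+2) _ (by omega)]
            rw [hdrop, hdrop2, reFindallDotApos, hq]
            simp
          · simp only [hq, if_false]
            rw [ih cs (i+1) _ (by omega)]
            rw [hdrop, hdrop2, reFindallDotApos]
            simp [hq, ← hdrop2]
        · have hge : ¬ i < cs.length - 1 := by omega
          have hdrop : cs.drop i = cs[i] :: cs.drop (i+1) := List.drop_eq_getElem_cons h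
          have hnil : cs.drop (i+1) = [] := List.drop_eq_nil_of_le (by omega)
          have hg1 : cs.getD i ' ' = cs[i] := List.getD_eq_getElem cs ' ' h
          simp only [hge, if_false, hg1]
          rw [ih cs (i+1) _ (by omega)]
          rw [hdrop, hnil, reFindallDotApos]
          simp [reFindallDotApos]
      · have hnil : List.drop i cs = [] := List.drop_eq_nil_of_le (by omega)
        rw [convertLoopA]
        simp [h, hnil, reFindallDotApos]

-- ===== VERDICT (by name: the statement is the Claim_ definition above) =====
theorem convert_string_to_list_spec : Claim_equal_convert_string_to_list := by
  intro s _
  unfold Spec_convert_string_to_list convert_string_to_list convert_string_to_list_alt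
  simpa using convertLoopA_eq s.toList.length s.toList 0 [] (by omega)
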